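-- pv_equiv track=rewrite | github.com/ralphmodales/mypy | mypy/plugins/struct.py | _parse_all_formats
-- ===== SOURCE A (Python) =====
-- from typing import Final
--
-- _BYTE_ORDER_PREFIX_CHARS: Final = frozenset("@=<>!")
--
-- _ASCII_WHITESPACE_CHARS: Final = frozenset(" \t\n\r\v\f")
--
-- _PAD_FORMAT_CHAR: Final = "x"
--
-- _BYTE_LENGTH_FORMAT_CHARS: Final = frozenset("sp")
--
-- _MAX_REPEAT: Final = 32
--
-- _FORMAT_CHAR_TO_FULLNAME: Final[dict[str, str]] = {
--     "b": "builtins.int",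
--     "B": "builtins.int",
--     "h": "builtins.int",
--     "H": "builtins.int",
--     "i": "builtins.int",
--     "I": "builtins.int",
--     "l": "builtins.int",
--     "L": "builtins.int",
--     "q": "builtins.int",
--     "Q": "builtins.int",
--     "n": "builtins.int",
--     "N": "builtins.int",
--     "P": "builtins.int",
--     "e": "builtins.float",
--     "f": "builtins.float",
--     "d": "builtins.float",
--     "?": "builtins.bool",
--     "c": "builtins.bytes",
--     "s": "builtins.bytes",
--     "p": "builtins.bytes",
-- }
--
-- def _read_byte_order_prefix(format_string: str, start: int) -> int:
--     if start < len(format_string) and format_string[start] in _BYTE_ORDER_PREFIX_CHARS: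
--         return start + 1
--     return start
--
-- def _read_decimal_repeat(format_string: str, start: int) -> tuple[int | None, int]:
--     position = start
--     length = len(format_string)
--     while position < length and format_string[position].isdigit():
--         position += 1
--     if position == start:
--         return None, position
--     digits = format_string[start:position]
--     return int(digits), position
--
-- def _parse_struct_format(format_string: str) -> list[str] | None:
--     length = len(format_string)
--     position = _read_byte_order_prefix(format_string, 0)
--     element_chars: list[str] = []
--     while position < length:
--         current_char = format_string[position]
--         if current_char in _ASCII_WHITESPACE_CHARS:
--             position += 1
--             continue
--         repeat_count, position_after_digits = _read_decimal_repeat(format_string, position)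
--         if repeat_count is not None:
--             if position_after_digits >= length:
--                 return None
--             position = position_after_digits
--             current_char = format_string[position]
--         if current_char == _PAD_FORMAT_CHAR:
--             position += 1
--             continue
--         if current_char not in _FORMAT_CHAR_TO_FULLNAME:
--             return None
--         if current_char in _BYTE_LENGTH_FORMAT_CHARS:
--             element_chars.append(current_char)
--         else:
--             effective_count = repeat_count if repeat_count is not None else 1
--             if effective_count > _MAX_REPEAT:
--                 return None
--             element_chars.extend([current_char] * effective_count)
--         if len(element_chars) > _MAX_REPEAT:
--             return None
--         position += 1
--     if len(element_chars) > _MAX_REPEAT: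
--         return None
--     return element_chars
--
-- def _parse_all_formats(format_strings: list[str]) -> list[list[str]] | None:
--     parsed: list[list[str]] = []
--     for fmt in format_strings:
--         chars = _parse_struct_format(fmt)
--         if chars is None:
--             return None
--         parsed.append(chars)
--     return parsed
-- ===== SOURCE B (Python) =====
-- # Two-pass re-implementation: tokenize each format string once, then interpret tokens.
-- from typing import Final
--
-- _BYTE_ORDER_PREFIX_CHARS: Final = frozenset("@=<>!")
-- _ASCII_WHITESPACE_CHARS: Final = frozenset(" \t\n\r\v\f")
-- _PAD_FORMAT_CHAR: Final = "x"
-- _BYTE_LENGTH_FORMAT_CHARS: Final = frozenset("sp")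
-- _MAX_REPEAT: Final = 32
-- _FORMAT_CHAR_TO_FULLNAME: Final[dict[str, str]] = {
--     "b": "builtins.int", "B": "builtins.int", "h": "builtins.int",
--     "H": "builtins.int", "i": "builtins.int", "I": "builtins.int",
--     "l": "builtins.int", "L": "builtins.int", "q": "builtins.int",
--     "Q": "builtins.int", "n": "builtins.int", "N": "builtins.int",
--     "P": "builtins.int", "e": "builtins.float", "f": "builtins.float",
--     "d": "builtins.float", "?": "builtins.bool", "c": "builtins.bytes",
--     "s": "builtins.bytes", "p": "builtins.bytes",
-- }
--
--
-- def _tokenize(format_string: str) -> list[tuple[int | None, str]] | None: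
--     """Pass 1: split the string (after an optional byte-order prefix at index 0)
--     into (repeat_or_None, char) tokens; digits at end of string are an error."""
--     n = len(format_string)
--     i = 1 if format_string and format_string[0] in _BYTE_ORDER_PREFIX_CHARS else 0
--     tokens: list[tuple[int | None, str]] = []
--     while i < n:
--         c = format_string[i]
--         if c.isdigit():
--             j = i
--             while j < n and format_string[j].isdigit():
--                 j += 1
--             if j >= n:
--                 return None
--             tokens.append((int(format_string[i:j]), format_string[j]))
--             i = j + 1
--         else:
--             tokens.append((None, c))
--             i += 1
--     return tokens
--
--
-- def _interpret(tokens: list[tuple[int | None, str]]) -> list[str] | None: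
--     """Pass 2: turn tokens into element chars, enforcing the repeat caps."""
--     out: list[str] = []
--     for repeat, c in tokens:
--         if repeat is None and c in _ASCII_WHITESPACE_CHARS:
--             continue
--         if c == _PAD_FORMAT_CHAR:
--             continue
--         if c not in _FORMAT_CHAR_TO_FULLNAME:
--             return None
--         if c in _BYTE_LENGTH_FORMAT_CHARS:
--             out.append(c)
--         else:
--             count = 1 if repeat is None else repeat
--             if count > _MAX_REPEAT:
--                 return None
--             out.extend([c] * count)
--         if len(out) > _MAX_REPEAT:
--             return None
--     return out
--
--
-- def _parse_struct_format(format_string: str) -> list[str] | None: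
--     tokens = _tokenize(format_string)
--     if tokens is None:
--         return None
--     return _interpret(tokens)
--
--
-- def _parse_all_formats(format_strings: list[str]) -> list[list[str]] | None:
--     parsed = [_parse_struct_format(fmt) for fmt in format_strings]
--     if any(p is None for p in parsed):
--         return None
--     return parsed
-- ===== Notes on version B (the rewrite author's own statement) =====
-- stated objective: alternative
-- what changed: B parses each format string in two explicit passes -- a tokenizer that strips the optional byte-order prefix and emits (repeat_or_None, char) tokens, then an interpreter folding over the token list -- and drives the whole thing with a list comprehension instead of A's single position-threaded loop with early returns.
import Mathlib
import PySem

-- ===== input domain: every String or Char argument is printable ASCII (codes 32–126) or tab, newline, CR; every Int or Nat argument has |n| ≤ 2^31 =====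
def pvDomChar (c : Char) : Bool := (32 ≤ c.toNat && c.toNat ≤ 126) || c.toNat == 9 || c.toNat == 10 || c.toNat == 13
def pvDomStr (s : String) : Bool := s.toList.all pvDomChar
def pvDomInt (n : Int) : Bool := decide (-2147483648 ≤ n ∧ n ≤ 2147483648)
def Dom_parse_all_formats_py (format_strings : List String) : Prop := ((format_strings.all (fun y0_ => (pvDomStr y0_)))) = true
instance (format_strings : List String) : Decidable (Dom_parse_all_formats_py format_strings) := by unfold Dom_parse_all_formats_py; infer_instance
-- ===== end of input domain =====

-- B re-implements each string's parse as two passes (tokenizer + interpreter); same values, no speed claim.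

-- ===== PORT A =====
def pvPrefixA : List Char := ['@', '=', '<', '>', '!']
def pvWsA : List Char := [' ', '\t', '\n', '\r', Char.ofNat 11, Char.ofNat 12]
def pvFmtA : List Char := ['b','B','h','H','i','I','l','L','q','Q','n','N','P','e','f','d','?','c','s','p']

def read_byte_order_prefixA (l : List Char) (start : Nat) : Nat :=
  if start < l.length ∧ pvPrefixA.contains (l.getD start ' ') then start + 1 else start

-- the `while position < length and format_string[position].isdigit()` scan of _read_decimal_repeat
def scanDigitsA (l : List Char) (position : Nat) : Nat :=
  if h : position < l.length ∧ (l.getD position ' ').isDigit then scanDigitsA l (position + 1)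
  else position
termination_by l.length - position
decreasing_by omega

-- int(digits): exact, digits is a nonempty run of ASCII digits
def read_decimal_repeatA (l : List Char) (start : Nat) : Option Int × Nat :=
  let position := scanDigitsA l start
  if position = start then (none, position)
  else (some ((PySem.Int.ofStr? (String.mk ((l.drop start).take (position - start)))).getD 0), position)

theorem read_decimal_repeatA_snd (l : List Char) (s : Nat) :
    (read_decimal_repeatA l s).2 = scanDigitsA l s := by
  by_cases h : scanDigitsA l s = s <;> simp [read_decimal_repeatA, h]

theorem scanDigitsA_ge (l : List Char) (position : Nat) : position ≤ scanDigitsA l position := by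
  unfold scanDigitsA; split
  · have := scanDigitsA_ge l (position + 1); omega
  · omega
termination_by l.length - position
decreasing_by omega

-- the while-loop of _parse_struct_format; the none-repeat and some-repeat paths share
-- the tail via pos2 (= position when no repeat was read, the char after the digits otherwise)
def parse_loopA (l : List Char) (position : Nat) (acc : List String) : Option (List String) :=
  if hp : position < l.length then
    let c := l.getD position ' '
    if pvWsA.contains c then parse_loopA l (position + 1) acc
    else
      let rd := read_decimal_repeatA l position
      if h2 : rd.1 ≠ none ∧ l.length ≤ rd.2 then none
      else
        let pos2 := if rd.1 = none then position else rd.2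
        let cc := l.getD pos2 ' '
        if cc = 'x' then parse_loopA l (pos2 + 1) acc
        else if ¬ pvFmtA.contains cc then none
        else if cc = 's' ∨ cc = 'p' then
          let acc2 := acc ++ [String.mk [cc]]
          if acc2.length > 32 then none else parse_loopA l (pos2 + 1) acc2
        else
          let eff := rd.1.getD 1
          if eff > 32 then none
          else
            let acc2 := acc ++ List.replicate eff.toNat (String.mk [cc])
            if acc2.length > 32 then none else parse_loopA l (pos2 + 1) acc2
  else if acc.length > 32 then none else some acc
termination_by l.length - position
decreasing_by
  · omega
  all_goals
    have hge := scanDigitsA_ge l position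
    have hsnd := read_decimal_repeatA_snd l position
    simp only [pos2, rd] at *
    split <;> omega

def parse_struct_formatA (s : String) : Option (List String) :=
  let l := s.toList
  parse_loopA l (read_byte_order_prefixA l 0) []

def parse_all_loopA (fs : List String) (parsed : List (List String)) : Option (List (List String)) :=
  match fs with
  | [] => some parsed
  | f :: rest =>
    match parse_struct_formatA f with
    | none => none
    | some cs => parse_all_loopA rest (parsed ++ [cs])

def parse_all_formats_py (format_strings : List String) : Option (List (List String)) :=
  parse_all_loopA format_strings []

-- ===== PORT B =====
def pvPrefixB : List Char := ['@', '=', '<', '>', '!']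
def pvWsB : List Char := [' ', '\t', '\n', '\r', Char.ofNat 11, Char.ofNat 12]
def pvFmtB : List Char := ['b','B','h','H','i','I','l','L','q','Q','n','N','P','e','f','d','?','c','s','p']

-- the inner `while j < n and format_string[j].isdigit()` of _tokenize
def scanDigitsB (l : List Char) (j : Nat) : Nat :=
  if h : j < l.length ∧ (l.getD j ' ').isDigit then scanDigitsB l (j + 1)
  else j
termination_by l.length - j
decreasing_by omega

theorem scanDigitsB_ge (l : List Char) (j : Nat) : j ≤ scanDigitsB l j := by
  unfold scanDigitsB; split
  · have := scanDigitsB_ge l (j + 1); omega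
  · omega
termination_by l.length - j
decreasing_by omega

def tokenizeB (l : List Char) (i : Nat) : Option (List (Option Int × Char)) :=
  if hi : i < l.length then
    let c := l.getD i ' '
    if c.isDigit then
      let j := scanDigitsB l i
      if hj : l.length ≤ j then none
      else
        match tokenizeB l (j + 1) with
        | none => none
        | some ts =>
          some ((some ((PySem.Int.ofStr? (String.mk ((l.drop i).take (j - i)))).getD 0),
                 l.getD j ' ') :: ts)
    else
      match tokenizeB l (i + 1) with
      | none => none
      | some ts => some ((none, c) :: ts)
  else some []
termination_by l.length - i
decreasing_by
  · have := scanDigitsB_ge l i; simp only [j] at *; omega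
  · omega

def interpretB (ts : List (Option Int × Char)) (out : List String) : Option (List String) :=
  match ts with
  | [] => some out
  | (rep, c) :: rest =>
    if rep = none ∧ pvWsB.contains c then interpretB rest out
    else if c = 'x' then interpretB rest out
    else if ¬ pvFmtB.contains c then none
    else if c = 's' ∨ c = 'p' then
      let out2 := out ++ [String.mk [c]]
      if out2.length > 32 then none else interpretB rest out2
    else
      let count := rep.getD 1
      if count > 32 then none
      else
        let out2 := out ++ List.replicate count.toNat (String.mk [c])
        if out2.length > 32 then none else interpretB rest out2

def startB (l : List Char) : Nat :=
  match l with
  | [] => 0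
  | c :: _ => if pvPrefixB.contains c then 1 else 0

def parse_struct_formatB (s : String) : Option (List String) :=
  let l := s.toList
  match tokenizeB l (startB l) with
  | none => none
  | some ts => interpretB ts []

def parse_all_formats_py_alt (format_strings : List String) : Option (List (List String)) :=
  let parsed := format_strings.map parse_struct_formatB
  if parsed.any Option.isNone then none
  else some (parsed.map (fun p => p.getD []))   -- no `none` survives the check: getD is exact

-- ===== PRECONDITION & SPEC =====
def Spec_parse_all_formats_py (format_strings : List String) (out : Option (List (List String))) : Prop := out = parse_all_formats_py_alt format_strings
instance (format_strings : List String) (out : Option (List (List String))) : Decidable (Spec_parse_all_formats_py format_strings out) := by unfold Spec_parse_all_formats_py; infer_instance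

-- ===== CLAIM (what is proved, stated in full; the proofs are below) =====
def Claim_equal_parse_all_formats_py : Prop := ∀ (format_strings : List String), Dom_parse_all_formats_py format_strings → Spec_parse_all_formats_py format_strings (parse_all_formats_py format_strings)

-- ===== LEMMAS AND PROOFS =====

theorem pvWs_eq : pvWsB = pvWsA := rfl
theorem pvFmt_eq : pvFmtB = pvFmtA := rfl

theorem scanDigits_eq (l : List Char) (i : Nat) : scanDigitsB l i = scanDigitsA l i := by
  unfold scanDigitsA scanDigitsB; split
  · exact scanDigits_eq l (i + 1)
  · rfl
termination_by l.length - i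
decreasing_by omega

theorem scanDigitsA_stop (l : List Char) (i : Nat)
    (h : ¬ (i < l.length ∧ (l.getD i ' ').isDigit = true)) : scanDigitsA l i = i := by
  unfold scanDigitsA; rw [dif_neg h]

theorem scanDigitsA_step (l : List Char) (i : Nat)
    (h : i < l.length ∧ (l.getD i ' ').isDigit = true) :
    scanDigitsA l i = scanDigitsA l (i + 1) := by
  conv_lhs => rw [scanDigitsA]
  rw [dif_pos h]

theorem ws_not_digit (c : Char) (h : pvWsA.contains c = true) : c.isDigit = false := by
  simp [pvWsA] at h
  rcases h with h | h | h | h | h | h <;> subst h <;> decide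

-- one token step: A's shared tail (at position p, with parsed repeat rep) equals B's
-- interpretation of the token (rep, l[p]) followed by the rest, given the IH at p+1
theorem stepLemma (l : List Char) (p : Nat) (acc : List String) (rep : Option Int)
    (hacc : acc.length ≤ 32)
    (hne : ¬ (rep = none ∧ pvWsB.contains (l.getD p ' ') = true))
    (ih : ∀ acc' : List String, acc'.length ≤ 32 →
      parse_loopA l (p + 1) acc' =
        (match tokenizeB l (p + 1) with
         | none => none
         | some ts => interpretB ts acc')) :
    (if l.getD p ' ' = 'x' then parse_loopA l (p + 1) acc
     else if ¬ pvFmtA.contains (l.getD p ' ') then none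
     else if l.getD p ' ' = 's' ∨ l.getD p ' ' = 'p' then
       (if (acc ++ [String.mk [l.getD p ' ']]).length > 32 then none
        else parse_loopA l (p + 1) (acc ++ [String.mk [l.getD p ' ']]))
     else if rep.getD 1 > 32 then none
     else if (acc ++ List.replicate (rep.getD 1).toNat (String.mk [l.getD p ' '])).length > 32 then none
     else parse_loopA l (p + 1) (acc ++ List.replicate (rep.getD 1).toNat (String.mk [l.getD p ' ']))) =
    (match (match tokenizeB l (p + 1) with
            | none => none
            | some ts => some ((rep, l.getD p ' ') :: ts)) with
     | none => none
     | some ts' => interpretB ts' acc) := by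
  set c := l.getD p ' ' with hc
  cases htok : tokenizeB l (p + 1) with
  | none =>
    show _ = (none : Option (List String))
    have hih : ∀ acc' : List String, acc'.length ≤ 32 → parse_loopA l (p + 1) acc' = none := by
      intro acc' h; rw [ih acc' h, htok]
    by_cases hx : c = 'x'
    · rw [if_pos hx]; exact hih acc hacc
    · rw [if_neg hx]
      by_cases hnf : ¬ pvFmtA.contains c = true
      · rw [if_pos hnf]
      · rw [if_neg hnf]
        by_cases hsp : c = 's' ∨ c = 'p'
        · rw [if_pos hsp]
          split
          · rfl
          · rename_i hlen
            exact hih _ (by simp at hlen ⊢; omega)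
        · rw [if_neg hsp]
          split
          · rfl
          · split
            · rfl
            · rename_i _ hlen
              exact hih _ (by simp at hlen ⊢; omega)
  | some ts =>
    show _ = interpretB ((rep, c) :: ts) acc
    have hih : ∀ acc' : List String, acc'.length ≤ 32 →
        parse_loopA l (p + 1) acc' = interpretB ts acc' := by
      intro acc' h; rw [ih acc' h, htok]
    rw [interpretB]
    dsimp only
    rw [if_neg hne, pvFmt_eq]
    by_cases hx : c = 'x'
    · rw [if_pos hx, if_pos hx]; exact hih acc hacc
    · rw [if_neg hx, if_neg hx]
      by_cases hnf : ¬ pvFmtA.contains c = true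
      · rw [if_pos hnf, if_pos hnf]
      · rw [if_neg hnf, if_neg hnf]
        by_cases hsp : c = 's' ∨ c = 'p'
        · rw [if_pos hsp, if_pos hsp]
          split
          · rfl
          · rename_i hlen
            exact hih _ (by simp at hlen ⊢; omega)
        · rw [if_neg hsp, if_neg hsp]
          split
          · rfl
          · split
            · rfl
            · rename_i _ hlen
              exact hih _ (by simp at hlen ⊢; omega)
set_option maxHeartbeats 1000000 in
theorem mainLemma (l : List Char) (i : Nat) (acc : List String) (hacc : acc.length ≤ 32) :
    parse_loopA l i acc =
      (match tokenizeB l i with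
       | none => none
       | some ts => interpretB ts acc) := by
  have ihnext : ∀ j : Nat, i ≤ j → j < l.length → ∀ acc' : List String, acc'.length ≤ 32 →
      parse_loopA l (j + 1) acc' =
        (match tokenizeB l (j + 1) with
         | none => none
         | some ts => interpretB ts acc') := by
    intro j hij hjl acc' hacc'
    exact mainLemma l (j + 1) acc' hacc'
  rw [parse_loopA, tokenizeB]
  by_cases hi : i < l.length
  · rw [dif_pos hi, dif_pos hi]
    dsimp only
    simp only [List.getD]
    set c := l[i]?.getD ' ' with hc
    have hcg : l.getD i ' ' = c := rfl
    by_cases hws : pvWsA.contains c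
    · -- whitespace char: A skips it, B's (none, c) token is skipped by the interpreter
      have hnd : c.isDigit = false := ws_not_digit c hws
      rw [if_pos hws, if_neg (by rw [hnd]; simp)]
      rw [ihnext i le_rfl hi acc hacc]
      cases tokenizeB l (i + 1) with
      | none => rfl
      | some ts =>
        show interpretB ts acc = interpretB ((none, c) :: ts) acc
        rw [interpretB]
        dsimp only
        rw [pvWs_eq, if_pos ⟨rfl, show pvWsA.contains (l.getD i ' ') = true from hws⟩]
    · by_cases hd : c.isDigit
      · -- digit run: A reads a repeat, B emits a (some v, next-char) token
        have hgt : i < scanDigitsA l i := by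
          have h1 := scanDigitsA_step l i ⟨hi, hd⟩
          have h2 := scanDigitsA_ge l (i + 1); omega
        have hrd : read_decimal_repeatA l i =
            (some ((PySem.Int.ofStr? (String.mk ((l.drop i).take (scanDigitsA l i - i)))).getD 0),
             scanDigitsA l i) := by
          have h : ¬ (scanDigitsA l i = i) := by omega
          simp [read_decimal_repeatA, h]
        rw [if_neg hws, if_pos hd]
        rw [show scanDigitsB l i = scanDigitsA l i from scanDigits_eq l i]
        simp only [hrd]
        by_cases hlen : l.length ≤ scanDigitsA l i
        · rw [dif_pos ⟨by simp, hlen⟩, dif_pos hlen]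
        · rw [dif_neg (by simp [hlen]), dif_neg hlen]
          simp only [reduceCtorEq, if_false]
          exact stepLemma l (scanDigitsA l i) acc (some _) hacc (by simp)
            (fun acc' h => ihnext (scanDigitsA l i) (by omega) (by omega) acc' h)
      · -- plain char: no repeat was read on either side
        have hrd : read_decimal_repeatA l i = (none, i) := by
          have h0 : scanDigitsA l i = i :=
            scanDigitsA_stop l i (by intro hcon; exact hd hcon.2)
          simp [read_decimal_repeatA, h0]
        rw [if_neg hws, if_neg hd]
        simp only [hrd]
        rw [dif_neg (by simp)]
        simp only [if_true]
        exact stepLemma l i acc none hacc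
          (by rw [pvWs_eq, hcg]; intro hcon; exact hws hcon.2)
          (fun acc' h => ihnext i le_rfl hi acc' h)
  · rw [dif_neg hi, dif_neg hi]
    show (if acc.length > 32 then none else some acc) = some acc
    rw [if_neg (by omega)]
termination_by l.length - i
decreasing_by omega
theorem parse_struct_eq (s : String) : parse_struct_formatA s = parse_struct_formatB s := by
  have hstart : read_byte_order_prefixA s.toList 0 = startB s.toList := by
    unfold read_byte_order_prefixA startB
    cases s.toList with
    | nil => rfl
    | cons a t => simp [show pvPrefixA = pvPrefixB from rfl]
  show parse_loopA s.toList (read_byte_order_prefixA s.toList 0) [] =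
    (match tokenizeB s.toList (startB s.toList) with
     | none => none
     | some ts => interpretB ts [])
  rw [hstart]
  exact mainLemma s.toList (startB s.toList) [] (by simp)

theorem allLemma (fs : List String) (parsed : List (List String)) :
    parse_all_loopA fs parsed =
      (if (fs.map parse_struct_formatB).any Option.isNone then none
       else some (parsed ++ (fs.map parse_struct_formatB).map (fun p => p.getD []))) := by
  induction fs generalizing parsed with
  | nil => simp [parse_all_loopA]
  | cons f rest ih =>
    rw [parse_all_loopA, parse_struct_eq]
    cases h : parse_struct_formatB f with
    | none => simp [h]
    | some cs => simp [h, ih]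

-- ===== VERDICT (by name: the statement is the Claim_ definition above) =====
theorem parse_all_formats_py_spec : Claim_equal_parse_all_formats_py := by
  intro fs _
  unfold Spec_parse_all_formats_py parse_all_formats_py parse_all_formats_py_alt
  rw [allLemma]
  simp
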